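-- pv_equiv track=rewrite | github.com/pypi-data/pypi-mirror-82 | packages/yqn-pytorch-framework/yqn_pytorch_framework-0.2.3-py3-none-any.whl/yqn_common/vocab_util.py | word_to_vocab_id
-- ===== SOURCE A (Python) =====
-- def word_to_vocab_id(s, word_to_id, max_length):
--     ids = []
--     for char in s:
--         try:
--             ids.append(word_to_id[char])
--         except:
--             ids.append(word_to_id["<UNK>"])
--     assert len(ids) == len(s)
--     if len(ids) >= max_length:
--         ids = ids[:max_length]
--     else:
--         ids = ids + [word_to_id["<PAD>"]] * (max_length - len(ids))
--     return ids
-- ===== SOURCE B (Python) =====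
-- def word_to_vocab_id(s, word_to_id, max_length):
--     n = len(s)
--     out = []
--     for i in range(max_length):
--         if i < n:
--             c = s[i]
--             out.append(word_to_id[c] if c in word_to_id else word_to_id["<UNK>"])
--         else:
--             out.append(word_to_id["<PAD>"])
--     return out
-- ===== Notes on version B (the rewrite author's own statement) =====
-- stated objective: simpler
-- what changed: Single loop over range(max_length) that emits the id (or UNK/PAD) per position directly, instead of building a full-length id list and then slicing or concatenating a padding list.
-- intended difference: When max_length is negative and len(s) > -max_length, A's ids[:max_length] uses Python's negative-slice rule and returns the first len(s)+max_length ids, while B returns [] — the intended result of truncating to a non-positive length. — e.g. on word_to_vocab_id("ab", [("a", 1), ("b", 2)], -1): A returns [1], B returns []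
import Mathlib
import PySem

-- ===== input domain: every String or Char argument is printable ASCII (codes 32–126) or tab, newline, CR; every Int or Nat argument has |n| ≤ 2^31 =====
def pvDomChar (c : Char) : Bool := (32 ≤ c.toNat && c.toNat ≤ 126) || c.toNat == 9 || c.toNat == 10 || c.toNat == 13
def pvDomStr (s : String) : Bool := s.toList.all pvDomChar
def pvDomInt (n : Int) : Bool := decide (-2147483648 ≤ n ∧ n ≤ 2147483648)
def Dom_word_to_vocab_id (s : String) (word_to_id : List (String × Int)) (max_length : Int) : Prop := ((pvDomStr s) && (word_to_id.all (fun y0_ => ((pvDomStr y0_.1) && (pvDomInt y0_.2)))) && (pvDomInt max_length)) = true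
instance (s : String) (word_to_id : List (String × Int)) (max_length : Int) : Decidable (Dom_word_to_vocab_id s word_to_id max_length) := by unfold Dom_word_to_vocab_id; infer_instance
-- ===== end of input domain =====

-- B replaces A's build-then-slice/pad two-phase structure by a single map over range(max_length)
-- emitting each position's id (or UNK/PAD) directly (objective: simpler); on negative max_length
-- with len(s) > -max_length A returns a negative-slice remnant while B returns [] (see D_ below).


-- dict lookup (first match, as Python dict → assoc list convention)
def pvLook (d : List (String × Int)) (k : String) : Option Int :=
  (d.find? (fun p => p.1 == k)).map (·.2)

-- ===== PORT A =====
-- A: map each char to its id (KeyError caught → UNK; the `.getD 0` default is unreachable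
-- under Pre_), then truncate with the Python slice ids[:max_length] or pad with PAD.
def word_to_vocab_id (s : String) (word_to_id : List (String × Int)) (max_length : Int) : List Int :=
  let ids := s.toList.map (fun c =>
    match pvLook word_to_id (String.ofList [c]) with
    | some v => v
    | none => (pvLook word_to_id "<UNK>").getD 0)
  if (ids.length : Int) ≥ max_length then
    PySem.List.slice ids none (some max_length)
  else
    ids ++ List.replicate (max_length - (ids.length : Int)).toNat ((pvLook word_to_id "<PAD>").getD 0)

-- ===== PORT B =====
-- B: one map over range(max_length); s[i] is ported with List.getD (exact: B only reads
-- s[i] when 0 ≤ i < len(s)); the `.getD 0` defaults are unreachable under Pre_.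
def word_to_vocab_id_alt (s : String) (word_to_id : List (String × Int)) (max_length : Int) : List Int :=
  let cs := s.toList
  (PySem.List.pyRange 0 max_length 1).map (fun i =>
    if i < (cs.length : Int) then
      let c := String.ofList [cs.getD i.toNat ' ']
      match pvLook word_to_id c with
      | some v => v
      | none => (pvLook word_to_id "<UNK>").getD 0
    else
      (pvLook word_to_id "<PAD>").getD 0)

-- ===== PRECONDITION & SPEC =====
-- Pre_ excludes exactly the inputs where Python A raises a KeyError: some character of s is
-- missing from the dict while "<UNK>" is missing, or padding is needed while "<PAD>" is missing.
def Pre_word_to_vocab_id (s : String) (word_to_id : List (String × Int)) (max_length : Int) : Prop :=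
  ((s.toList.all fun c => (pvLook word_to_id (String.ofList [c])).isSome) = true
      ∨ (pvLook word_to_id "<UNK>").isSome = true)
  ∧ (((s.toList.length : Int) < max_length) → (pvLook word_to_id "<PAD>").isSome = true)
instance (s : String) (word_to_id : List (String × Int)) (max_length : Int) : Decidable (Pre_word_to_vocab_id s word_to_id max_length) := by unfold Pre_word_to_vocab_id; infer_instance

def pvWitness_word_to_vocab_id : String × (List (String × Int)) × Int :=
  ("ab", [("a", 1), ("<UNK>", 0), ("<PAD>", 2)], 4)

-- On negative max_length with len(s) > -max_length, A's ids[:max_length] follows Python's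
-- negative-slice rule and returns the first len(s)+max_length ids, while B returns [] —
-- the intended result of truncating to a non-positive length.
def D_word_to_vocab_id (s : String) (word_to_id : List (String × Int)) (max_length : Int) : Prop :=
  max_length < 0 ∧ 0 < (s.toList.length : Int) + max_length
instance (s : String) (word_to_id : List (String × Int)) (max_length : Int) : Decidable (D_word_to_vocab_id s word_to_id max_length) := by unfold D_word_to_vocab_id; infer_instance

def Spec_word_to_vocab_id (s : String) (word_to_id : List (String × Int)) (max_length : Int) (out : List Int) : Prop := ¬ D_word_to_vocab_id s word_to_id max_length → out = word_to_vocab_id_alt s word_to_id max_length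
instance (s : String) (word_to_id : List (String × Int)) (max_length : Int) (out : List Int) : Decidable (Spec_word_to_vocab_id s word_to_id max_length out) := by unfold Spec_word_to_vocab_id; infer_instance

def pvDiffWitness_word_to_vocab_id : String × (List (String × Int)) × Int :=
  ("ab", [("a", 1), ("b", 2)], -1)
def pvDiffWitnessOut_word_to_vocab_id : (List Int) × (List Int) := ([1], [])

-- ===== CLAIM (what is proved, stated in full; the proofs are below) =====
def Claim_unchanged_word_to_vocab_id : Prop := ∀ (s : String) (word_to_id : List (String × Int)) (max_length : Int), Dom_word_to_vocab_id s word_to_id max_length → Pre_word_to_vocab_id s word_to_id max_length → Spec_word_to_vocab_id s word_to_id max_length (word_to_vocab_id s word_to_id max_length)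
def Claim_changed_word_to_vocab_id : Prop := Dom_word_to_vocab_id (pvDiffWitness_word_to_vocab_id.1) (pvDiffWitness_word_to_vocab_id.2.1) (pvDiffWitness_word_to_vocab_id.2.2) ∧ Pre_word_to_vocab_id (pvDiffWitness_word_to_vocab_id.1) (pvDiffWitness_word_to_vocab_id.2.1) (pvDiffWitness_word_to_vocab_id.2.2) ∧ D_word_to_vocab_id (pvDiffWitness_word_to_vocab_id.1) (pvDiffWitness_word_to_vocab_id.2.1) (pvDiffWitness_word_to_vocab_id.2.2) ∧ word_to_vocab_id (pvDiffWitness_word_to_vocab_id.1) (pvDiffWitness_word_to_vocab_id.2.1) (pvDiffWitness_word_to_vocab_id.2.2) = pvDiffWitnessOut_word_to_vocab_id.1 ∧ word_to_vocab_id_alt (pvDiffWitness_word_to_vocab_id.1) (pvDiffWitness_word_to_vocab_id.2.1) (pvDiffWitness_word_to_vocab_id.2.2) = pvDiffWitnessOut_word_to_vocab_id.2 ∧ pvDiffWitnessOut_word_to_vocab_id.1 ≠ pvDiffWitnessOut_word_to_vocab_id.2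
def Claim_exact_word_to_vocab_id : Prop := ∀ (s : String) (word_to_id : List (String × Int)) (max_length : Int), Dom_word_to_vocab_id s word_to_id max_length → Pre_word_to_vocab_id s word_to_id max_length → D_word_to_vocab_id s word_to_id max_length → word_to_vocab_id s word_to_id max_length ≠ word_to_vocab_id_alt s word_to_id max_length

-- ===== LEMMAS AND PROOFS =====

-- Both branches of A produce, for m not in the D_ region, the positionwise description that B
-- computes directly: element k is g cs[k] for k < len(cs) and pad beyond, for k < m.
theorem pv_core (cs : List Char) (g : Char → Int) (pad : Int) (m : Int)
    (h : ¬ (m < 0 ∧ 0 < (cs.length : Int) + m)) :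
    (if ((cs.map g).length : Int) ≥ m then PySem.List.slice (cs.map g) none (some m)
     else (cs.map g) ++ List.replicate (m - ((cs.map g).length : Int)).toNat pad)
    = (PySem.List.pyRange 0 m 1).map (fun i =>
        if i < (cs.length : Int) then g (cs.getD i.toNat ' ') else pad) := by
  rcases (by omega : m ≤ 0 ∨ 0 < m) with hm | hm
  · -- RHS is []
    have hr : PySem.List.pyRange 0 m 1 = [] := by
      rw [PySem.List.pyRange_one]
      simp
      omega
    rw [hr, List.map_nil]
    have hge : ((cs.map g).length : Int) ≥ m := by
      have := Int.natCast_nonneg (cs.map g).length; omega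
    rw [if_pos hge]
    rcases eq_or_lt_of_le hm with he | hlt
    · subst he
      rw [PySem.List.slice_to _ (by omega)]
      simp
    · have hk : m = -(((-m).toNat : ℕ) : ℤ) := by omega
      rw [hk, PySem.List.slice_to_neg_natCast _ _ (by omega)]
      have hlen : cs.length ≤ (-m).toNat := by
        simp only [not_and, not_lt] at h
        have := h hlt
        omega
      simp [List.length_map, Nat.sub_eq_zero_of_le hlen]
  · -- 0 < m : compare elementwise
    have hmN : m = ((m.toNat : ℕ) : ℤ) := by omega
    have hget : ∀ (k : ℕ) (hkc : k < cs.length), cs.getD ((0 + (k:Int)).toNat) ' ' = cs[k] := by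
      intro k hkc
      have hz : (0 + (k:Int)).toNat = k := by omega
      rw [hz, List.getD_eq_getElem _ _ hkc]
    by_cases hge : ((cs.map g).length : Int) ≥ m
    have hge' := hge
    simp only [List.length_map] at hge'
    · rw [if_pos hge, hmN, PySem.List.slice_to_natCast]
      apply List.ext_getElem
      · simp only [List.length_take, List.length_map, PySem.List.length_pyRange_one]
        omega
      · intro k h1 h2
        rw [List.getElem_take, List.getElem_map, List.getElem_map,
          PySem.List.getElem_pyRange_one]
        have hkc : k < cs.length := by
          simp only [List.length_take, List.length_map] at h1; omega
        rw [if_pos (by omega : (0:Int) + (k:Int) < (cs.length : Int)), hget k hkc]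
    · rw [if_neg hge]
      have hge' := hge
      simp only [List.length_map] at hge'
      apply List.ext_getElem
      · simp only [List.length_append, List.length_map, List.length_replicate,
          PySem.List.length_pyRange_one]
        omega
      · intro k h1 h2
        rw [List.getElem_map, PySem.List.getElem_pyRange_one]
        by_cases hkc : k < cs.length
        · rw [List.getElem_append_left (by simpa using hkc), List.getElem_map,
            if_pos (by omega : (0:Int) + (k:Int) < (cs.length : Int)), hget k hkc]
        · rw [List.getElem_append_right (by simpa using hkc), List.getElem_replicate,
            if_neg (by omega)]

theorem word_to_vocab_id_spec : Claim_unchanged_word_to_vocab_id := by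
  intro s d m _ _ hD
  simp only [word_to_vocab_id, word_to_vocab_id_alt]
  exact pv_core s.toList
    (fun c => match pvLook d (String.ofList [c]) with
      | some v => v
      | none => (pvLook d "<UNK>").getD 0)
    ((pvLook d "<PAD>").getD 0) m (by unfold D_word_to_vocab_id at hD; exact hD)

theorem pv_c1 : Dom_word_to_vocab_id "ab" [("a", 1), ("b", 2)] (-1) := by decide
theorem pv_c2 : Pre_word_to_vocab_id "ab" [("a", 1), ("b", 2)] (-1) := by decide
theorem pv_c3 : D_word_to_vocab_id "ab" [("a", 1), ("b", 2)] (-1) := by decide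
theorem pv_c4 : word_to_vocab_id "ab" [("a", 1), ("b", 2)] (-1) = [1] := by decide
theorem pv_c5 : word_to_vocab_id_alt "ab" [("a", 1), ("b", 2)] (-1) = [] := by decide
theorem word_to_vocab_id_changed : Claim_changed_word_to_vocab_id := by
  unfold Claim_changed_word_to_vocab_id pvDiffWitness_word_to_vocab_id pvDiffWitnessOut_word_to_vocab_id
  exact ⟨pv_c1, pv_c2, pv_c3, pv_c4, pv_c5, by decide⟩

theorem word_to_vocab_id_tight : Claim_exact_word_to_vocab_id := by
  intro s d m _ _ hD
  obtain ⟨hm, hlen⟩ := hD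
  intro heq
  have hA : (word_to_vocab_id s d m).length ≠ 0 := by
    simp only [word_to_vocab_id]
    rw [if_pos (by simp; omega)]
    have hk : m = -(((-m).toNat : ℕ) : ℤ) := by omega
    rw [hk, PySem.List.slice_to_neg_natCast _ _ (by omega)]
    rw [List.length_take, List.length_map]
    omega
  have hB : (word_to_vocab_id_alt s d m).length = 0 := by
    simp only [word_to_vocab_id_alt]
    rw [List.length_map, PySem.List.length_pyRange_one]
    omega
  rw [heq, hB] at hA
  exact hA rfl
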